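-- pv_equiv track=rewrite | github.com/FoulSpark/Advanced-MCP-Server-for-Intelligent-Code-Completion | advanced_mcp_server.py | _parse_function_suggestions
-- ===== SOURCE A (Python) =====
-- from typing import List, Dict, Any, Optional
--
-- def _parse_function_suggestions(suggestions_text: str) -> Dict[str, List[str]]:
--     """Parse function call suggestions from AI response"""
--     suggestions = {
--         "function_calls": [],
--         "class_instantiations": [],
--         "method_calls": [],
--         "imports": []
--     }
--
--     current_section = None
--     lines = suggestions_text.split('\n')
--
--     for line in lines:
--         line = line.strip()
--         if line.startswith('FUNCTION_CALLS:'):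
--             current_section = 'function_calls'
--         elif line.startswith('CLASS_INSTANTIATIONS:'):
--             current_section = 'class_instantiations'
--         elif line.startswith('METHOD_CALLS:'):
--             current_section = 'method_calls'
--         elif line.startswith('IMPORTS:'):
--             current_section = 'imports'
--         elif line.startswith('-') and current_section:
--             suggestion = line[1:].strip()
--             if suggestion:
--                 suggestions[current_section].append(suggestion)
--
--     return suggestions
-- ===== SOURCE B (Python) =====
-- # B: chunk the text into header-delimited sections and collect each section's
-- # bullet items with one comprehension, instead of A's per-line state machine.
-- _HEADERS = [
--     ('FUNCTION_CALLS:', 'function_calls'),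
--     ('CLASS_INSTANTIATIONS:', 'class_instantiations'),
--     ('METHOD_CALLS:', 'method_calls'),
--     ('IMPORTS:', 'imports'),
-- ]
--
-- def _key_of(s):
--     for prefix, key in _HEADERS:
--         if s.startswith(prefix):
--             return key
--     return None
--
-- def _parse_function_suggestions(suggestions_text: str):
--     res = {key: [] for _, key in _HEADERS}
--     lines = [l.strip() for l in suggestions_text.split('\n')]
--     while True:
--         # drop everything up to the next header line
--         while lines and _key_of(lines[0]) is None:
--             lines.pop(0)
--         if not lines:
--             return res
--         key = _key_of(lines.pop(0))
--         seg = []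
--         while lines and _key_of(lines[0]) is None:
--             seg.append(lines.pop(0))
--         res[key].extend(s[1:].strip() for s in seg
--                         if s.startswith('-') and s[1:].strip())
-- ===== Notes on version B (the rewrite author's own statement) =====
-- stated objective: alternative
-- what changed: Replaces A's single-pass per-line state machine (a current_section variable updated by an if/elif chain) with a chunking decomposition: strip all lines once, repeatedly skip to the next header line, take the header's whole section body, and collect its bullet items with one comprehension per section.
import Mathlib
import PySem

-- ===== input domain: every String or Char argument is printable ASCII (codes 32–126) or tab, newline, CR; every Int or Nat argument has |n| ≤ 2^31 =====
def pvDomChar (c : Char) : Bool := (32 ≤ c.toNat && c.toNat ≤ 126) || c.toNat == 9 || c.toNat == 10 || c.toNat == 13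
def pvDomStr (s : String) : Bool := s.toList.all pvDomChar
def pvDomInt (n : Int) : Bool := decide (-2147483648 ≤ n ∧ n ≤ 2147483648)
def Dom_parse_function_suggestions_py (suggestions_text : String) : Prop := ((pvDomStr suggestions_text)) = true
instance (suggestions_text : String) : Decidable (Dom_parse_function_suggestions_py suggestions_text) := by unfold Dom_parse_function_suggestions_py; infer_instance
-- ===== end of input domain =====

-- B replaces A's per-line state machine by chunking the lines into header-delimited
-- sections and collecting each section's bullet items in one comprehension (objective:
-- alternative decomposition, same cost).

-- ===== PORT A =====
-- A's per-line step: strip was already applied (the port applies it in the fold, see below).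
def stepA (st : Option String × List (String × List String)) (l : String) :
    Option String × List (String × List String) :=
  if PySem.Str.startswith l "FUNCTION_CALLS:" then (some "function_calls", st.2)
  else if PySem.Str.startswith l "CLASS_INSTANTIATIONS:" then (some "class_instantiations", st.2)
  else if PySem.Str.startswith l "METHOD_CALLS:" then (some "method_calls", st.2)
  else if PySem.Str.startswith l "IMPORTS:" then (some "imports", st.2)
  else
    match st.1 with
    | some k =>
        if PySem.Str.startswith l "-" then
          let sug := PySem.Str.strip (PySem.Str.slice l (some 1) none)
          if sug ≠ "" then
            (some k, st.2.map (fun p => if p.1 = k then (p.1, p.2 ++ [sug]) else p))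
          else st
        else st
    | none => st

def pvInit : List (String × List String) :=
  [("function_calls", []), ("class_instantiations", []), ("method_calls", []), ("imports", [])]

def parse_function_suggestions_py (suggestions_text : String) : List (String × List String) :=
  -- lines = suggestions_text.split('\n'); split? with a nonempty separator never fails
  let lines := (PySem.Str.split? suggestions_text "\n").getD []
  (lines.foldl (fun st line => stepA st (PySem.Str.strip line)) (none, pvInit)).2

-- ===== PORT B =====
def pvHeaders : List (String × String) :=
  [("FUNCTION_CALLS:", "function_calls"), ("CLASS_INSTANTIATIONS:", "class_instantiations"),
   ("METHOD_CALLS:", "method_calls"), ("IMPORTS:", "imports")]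

def bKeyOf (s : String) : Option String :=
  (pvHeaders.find? (fun p => PySem.Str.startswith s p.1)).map (·.2)

def bNoKey (s : String) : Bool := (bKeyOf s).isNone

-- res[key].extend(items)
def dictExtend (res : List (String × List String)) (k : String) (items : List String) :
    List (String × List String) :=
  res.map (fun p => if p.1 = k then (p.1, p.2 ++ items) else p)

-- the per-line item of the section-body comprehension
def itemsOf (s : String) : List String :=
  if PySem.Str.startswith s "-" then
    let it := PySem.Str.strip (PySem.Str.slice s (some 1) none)
    if it ≠ "" then [it] else []
  else []

def bItems (seg : List String) : List String := seg.flatMap itemsOf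

def bGo (ls : List String) (res : List (String × List String)) : List (String × List String) :=
  match h : ls.dropWhile bNoKey with
  | [] => res
  | hd :: rest =>
      bGo (rest.dropWhile bNoKey)
        (dictExtend res ((bKeyOf hd).getD "") (bItems (rest.takeWhile bNoKey)))
termination_by ls.length
decreasing_by
  have h1 : (ls.dropWhile bNoKey).length ≤ ls.length := List.length_dropWhile_le _ _
  rw [h] at h1
  have h2 : (rest.dropWhile bNoKey).length ≤ rest.length := List.length_dropWhile_le _ _
  simp at h1; omega

-- res = {key: [] for _, key in HEADERS}
def bInit : List (String × List String) := pvHeaders.map (fun p => (p.2, []))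

def parse_function_suggestions_py_alt (suggestions_text : String) : List (String × List String) :=
  let lines := ((PySem.Str.split? suggestions_text "\n").getD []).map PySem.Str.strip
  bGo lines bInit

-- ===== PRECONDITION & SPEC =====
def Spec_parse_function_suggestions_py (suggestions_text : String) (out : List (String × List String)) : Prop := out = parse_function_suggestions_py_alt suggestions_text
instance (suggestions_text : String) (out : List (String × List String)) : Decidable (Spec_parse_function_suggestions_py suggestions_text out) := by unfold Spec_parse_function_suggestions_py; infer_instance

-- ===== CLAIM (what is proved, stated in full; the proofs are below) =====
def Claim_equal_parse_function_suggestions_py : Prop := ∀ (suggestions_text : String), Dom_parse_function_suggestions_py suggestions_text → Spec_parse_function_suggestions_py suggestions_text (parse_function_suggestions_py suggestions_text)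

-- ===== LEMMAS AND PROOFS =====

theorem dictExtend_nil (res : List (String × List String)) (k : String) :
    dictExtend res k [] = res := by
  induction res with
  | nil => rfl
  | cons p t ih =>
      simp only [dictExtend, List.map_cons] at ih ⊢
      rw [ih]
      split_ifs with h
      · simp
      · rfl

theorem dictExtend_dictExtend (res : List (String × List String)) (k : String)
    (xs ys : List String) :
    dictExtend (dictExtend res k xs) k ys = dictExtend res k (xs ++ ys) := by
  induction res with
  | nil => rfl
  | cons p t ih =>
      simp only [dictExtend, List.map_cons] at ih ⊢
      rw [ih]
      split_ifs with h
      · simp [h]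
      · simp [h]

theorem stepA_header (cur : Option String) (res : List (String × List String))
    (l : String) (k : String) (h : bKeyOf l = some k) :
    stepA (cur, res) l = (some k, res) := by
  simp only [bKeyOf, pvHeaders, List.find?] at h
  unfold stepA
  by_cases h1 : PySem.Str.startswith l "FUNCTION_CALLS:" <;>
    by_cases h2 : PySem.Str.startswith l "CLASS_INSTANTIATIONS:" <;>
      by_cases h3 : PySem.Str.startswith l "METHOD_CALLS:" <;>
        by_cases h4 : PySem.Str.startswith l "IMPORTS:" <;>
          simp_all

theorem stepA_nonheader (cur : Option String) (res : List (String × List String))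
    (l : String) (h : bKeyOf l = none) :
    stepA (cur, res) l =
      (cur, match cur with
            | none => res
            | some k => dictExtend res k (itemsOf l)) := by
  simp only [bKeyOf, Option.map_eq_none_iff, List.find?_eq_none] at h
  have h1 : PySem.Str.startswith l "FUNCTION_CALLS:" = false := by
    simpa using h ("FUNCTION_CALLS:", "function_calls") (by simp [pvHeaders])
  have h2 : PySem.Str.startswith l "CLASS_INSTANTIATIONS:" = false := by
    simpa using h ("CLASS_INSTANTIATIONS:", "class_instantiations") (by simp [pvHeaders])
  have h3 : PySem.Str.startswith l "METHOD_CALLS:" = false := by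
    simpa using h ("METHOD_CALLS:", "method_calls") (by simp [pvHeaders])
  have h4 : PySem.Str.startswith l "IMPORTS:" = false := by
    simpa using h ("IMPORTS:", "imports") (by simp [pvHeaders])
  unfold stepA
  simp only [h1, h2, h3, h4, Bool.false_eq_true, if_false]
  cases cur with
  | none => rfl
  | some k =>
      by_cases hdash : PySem.Chars.startswith l.toList ['-'] = true
      · by_cases he : PySem.Str.strip (PySem.Str.slice l (some 1) none) = ""
        · simp [itemsOf, hdash, he, dictExtend_nil]
        · simp [itemsOf, hdash, he, dictExtend]
      · simp_all [itemsOf, dictExtend_nil]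

-- unfolding bGo once on a list that starts with its dropWhile already done
theorem bGo_eq (ls : List String) (res : List (String × List String)) :
    bGo ls res =
      match ls.dropWhile bNoKey with
      | [] => res
      | hd :: rest =>
          bGo (rest.dropWhile bNoKey)
            (dictExtend res ((bKeyOf hd).getD "") (bItems (rest.takeWhile bNoKey))) := by
  rw [bGo]
  rcases h : List.dropWhile bNoKey ls with _ | ⟨hd, rest⟩ <;> simp

theorem bGo_dropWhile (ls : List String) (res : List (String × List String)) :
    bGo (ls.dropWhile bNoKey) res = bGo ls res := by
  rw [bGo_eq, bGo_eq, List.dropWhile_idempotent]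

-- main bridge: A's fold equals B's chunked recursion
theorem bridge (ls : List String) (cur : Option String) (res : List (String × List String)) :
    (ls.foldl stepA (cur, res)).2 =
      bGo (ls.dropWhile bNoKey)
        (match cur with
         | none => res
         | some k => dictExtend res k (bItems (ls.takeWhile bNoKey))) := by
  induction ls generalizing cur res with
  | nil =>
      cases cur with
      | none => simp [bGo_eq]
      | some k => simp [bGo_eq, bItems, dictExtend_nil]
  | cons l tl ih =>
      cases hk : bKeyOf l with
      | some k =>
          have hnk : bNoKey l = false := by simp [bNoKey, hk]
          simp only [List.foldl_cons, stepA_header cur res l k hk, ih (some k) res]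
          rw [List.dropWhile_cons]
          simp only [hnk, Bool.false_eq_true, if_false]
          conv_rhs => rw [bGo_eq]
          simp only [List.dropWhile_cons, List.takeWhile_cons, hnk, Bool.false_eq_true,
            if_false, hk, Option.getD_some]
          cases cur with
          | none => rfl
          | some k0 => simp [bItems, dictExtend_nil]
      | none =>
          have hnk : bNoKey l = true := by simp [bNoKey, hk]
          have hstep := stepA_nonheader cur res l hk
          simp only [List.foldl_cons, hstep]
          rw [List.dropWhile_cons, hnk]
          cases cur with
          | none =>
              simpa using ih none res
          | some k0 =>
              rw [ih (some k0) (dictExtend res k0 (itemsOf l))]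
              simp [hnk, bItems, dictExtend_dictExtend]

-- ===== VERDICT (by name: the statement is the Claim_ definition above) =====
theorem parse_function_suggestions_py_spec : Claim_equal_parse_function_suggestions_py := by
  intro t _
  unfold Spec_parse_function_suggestions_py parse_function_suggestions_py
    parse_function_suggestions_py_alt
  dsimp only
  rw [← List.foldl_map]
  rw [bridge _ none pvInit]
  rw [show pvInit = bInit from rfl]
  exact bGo_dropWhile _ _
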